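-- pv_equiv track=rewrite | github.com/yeoniiii/Baekjoon | 백준/Bronze/1284. 집 주소/집 주소.py | wid
-- ===== SOURCE A (Python) =====
-- def wid(x):
--     n = len(x)
--     width = n + 1
--     for i in range(n):
--         if x[i] == '1':
--             width += 2
--         elif x[i] == '0':
--             width += 4
--         else:
--             width += 3
--     return width
-- ===== SOURCE B (Python) =====
-- def wid(x):
--     return 4 * len(x) + 1 - x.count('1') + x.count('0')
-- ===== Notes on version B (the rewrite author's own statement) =====
-- stated objective: simpler
-- what changed: Replaced the per-character branching loop with a closed-form expression: every character contributes 3 plus the n+1 offset, with '1' one less and '0' one more, so the result is 4*len(x)+1-x.count('1')+x.count('0').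
import Mathlib
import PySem

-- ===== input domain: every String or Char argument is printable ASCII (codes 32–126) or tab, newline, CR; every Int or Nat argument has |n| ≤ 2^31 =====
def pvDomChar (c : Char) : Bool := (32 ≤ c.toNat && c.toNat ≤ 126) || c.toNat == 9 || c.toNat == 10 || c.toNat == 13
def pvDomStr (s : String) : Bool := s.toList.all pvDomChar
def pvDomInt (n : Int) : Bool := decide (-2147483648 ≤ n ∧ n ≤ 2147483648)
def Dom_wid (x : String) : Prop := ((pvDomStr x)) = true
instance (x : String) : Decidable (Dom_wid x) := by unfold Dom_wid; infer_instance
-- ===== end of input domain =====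

-- B replaces A's per-character branching loop with the closed form 4*len(x)+1 - count('1') + count('0') (simpler, no loop or branches).

-- ===== PORT A =====
def wid (x : String) : Int :=
  let n : Int := PySem.Str.len x
  (PySem.List.pyRange 0 n 1).foldl (fun width i =>
    if PySem.List.pyGetD x.toList i ' ' = '1' then width + 2
    else if PySem.List.pyGetD x.toList i ' ' = '0' then width + 4
    else width + 3) (n + 1)

-- ===== PORT B =====
def wid_alt (x : String) : Int :=
  4 * PySem.Str.len x + 1 - (PySem.Str.count x "1" : Int) + (PySem.Str.count x "0" : Int)

-- ===== PRECONDITION & SPEC =====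
def Spec_wid (x : String) (out : Int) : Prop := out = wid_alt x
instance (x : String) (out : Int) : Decidable (Spec_wid x out) := by unfold Spec_wid; infer_instance

-- ===== CLAIM (what is proved, stated in full; the proofs are below) =====
def Claim_equal_wid : Prop := ∀ (x : String), Dom_wid x → Spec_wid x (wid x)

-- ===== LEMMAS AND PROOFS =====

theorem pv_go_singleton (c : Char) : ∀ (fuel : Nat) (l : List Char) (acc : Nat), l.length ≤ fuel →
    PySem.Chars.count.go [c] fuel l acc = acc + l.count c := by
  intro fuel
  induction fuel with
  | zero =>
    intro l acc h
    have : l = [] := List.length_eq_zero_iff.mp (Nat.le_zero.mp h)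
    subst this; simp [PySem.Chars.count.go]
  | succ n ih =>
    intro l acc h
    cases l with
    | nil => simp [PySem.Chars.count.go]
    | cons hd t =>
      rw [PySem.Chars.count.go]
      by_cases hc : hd = c
      · simp [hc, List.isPrefixOf, ih t (acc + 1) (by simpa using h)]
        omega
      · simp [List.isPrefixOf, Ne.symm hc, hc, ih t acc (by simpa using h)]

theorem pv_count_singleton (s : List Char) (c : Char) :
    PySem.Chars.count s [c] = s.count c := by
  simp [PySem.Chars.count, pv_go_singleton c s.length s 0 le_rfl]

theorem pv_foldl_width (l : List Char) : ∀ (a : Int),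
    l.foldl (fun width c =>
      if c = '1' then width + 2 else if c = '0' then width + 4 else width + 3) a
    = a + 3 * l.length - (l.count '1' : Int) + (l.count '0' : Int) := by
  induction l with
  | nil => intro a; simp
  | cons hd t ih =>
    intro a
    by_cases h1 : hd = '1'
    · simp [h1, ih]; ring
    · by_cases h0 : hd = '0'
      · simp [h0, ih]; ring
      · simp [h1, h0, ih]; ring

-- ===== VERDICT (by name: the statement is the Claim_ definition above) =====
theorem wid_spec : Claim_equal_wid := by
  intro x _
  unfold Spec_wid wid wid_alt
  simp only [PySem.Str.len_eq, PySem.Str.count_eq]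
  rw [PySem.List.foldl_pyRange_zero_pyGetD' x.toList ' '
        (fun width c => if c = '1' then width + 2 else if c = '0' then width + 4 else width + 3)]
  rw [pv_foldl_width]
  have e1 : ("1" : String).toList = ['1'] := rfl
  have e0 : ("0" : String).toList = ['0'] := rfl
  rw [e1, e0, pv_count_singleton, pv_count_singleton]
  ring
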